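-- pv_equiv track=rewrite | github.com/loop614/pvoronoi | main.py | generate_rgb_diversity_arrays
-- ===== SOURCE A (Python) =====
-- from bisect import bisect_left
--
-- def get_next_color_value(color_value: int, diversity_colors: list[int]) -> int:
--     current_index = diversity_colors.index(color_value)
--     if current_index + 1 < len(diversity_colors):
--         return diversity_colors[current_index + 1]
--
--     return diversity_colors[0]
--
-- def diversity_numbers_for_colors() -> list[int]:
--     pivot: list[int] = [0, 255]
--     pair: list[int] = []
--     to_be_added: list[int] = []
--     res: list[int] = [0, 255]
--     while len(pivot) < 255:
--         for one in pivot: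
--             if len(pair) != 2:
--                 pair.append(one)
--             if len(pair) == 2:
--                 next_one = (pair[0] + pair[1]) // 2
--                 to_be_added.append(next_one)
--                 pair.pop(0)
--
--         pair = []
--         for next_one in to_be_added:
--             index = bisect_left(pivot, next_one)
--             pivot.insert(index, next_one)
--             res.append(next_one)
--             to_be_added = []
--
--     return res
--
-- def generate_rgb_diversity_arrays(
--     n: int,
-- ) -> tuple[list[int], list[int], list[int]]:
--     red = []
--     green = []
--     blue = []
--     go_red = True
--     go_green = False
--     go_blue = False
--     red_value = 0
--     green_value = 0
--     blue_value = 0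
--     diversity_numbers = diversity_numbers_for_colors()
--
--     for i in range(n):
--         red.append(red_value)
--         green.append(green_value)
--         blue.append(blue_value)
--
--         if go_red:
--             red_value = get_next_color_value(red_value, diversity_numbers)
--             go_red, go_green, go_blue = False, True, False
--         elif go_green:
--             green_value = get_next_color_value(green_value, diversity_numbers)
--             go_red, go_green, go_blue = False, False, True
--         elif go_blue:
--             blue_value = get_next_color_value(blue_value, diversity_numbers)
--             go_red, go_green, go_blue = True, False, False
--
--     return red, green, blue
-- ===== SOURCE B (Python) =====
-- # B: precompute the value-successor cycle once, then index it directly with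
-- # ((i+2)//3) % L style formulas instead of A's rotating-flag state machine.
-- def diversity_numbers_for_colors() -> list[int]:
--     from bisect import bisect_left
--     pivot: list[int] = [0, 255]
--     pair: list[int] = []
--     to_be_added: list[int] = []
--     res: list[int] = [0, 255]
--     while len(pivot) < 255:
--         for one in pivot:
--             if len(pair) != 2:
--                 pair.append(one)
--             if len(pair) == 2:
--                 next_one = (pair[0] + pair[1]) // 2
--                 to_be_added.append(next_one)
--                 pair.pop(0)
--
--         pair = []
--         for next_one in to_be_added:
--             index = bisect_left(pivot, next_one)
--             pivot.insert(index, next_one)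
--             res.append(next_one)
--             to_be_added = []
--
--     return res
--
--
-- def generate_rgb_diversity_arrays(
--     n: int,
-- ) -> tuple[list[int], list[int], list[int]]:
--     div = diversity_numbers_for_colors()
--     # One period of the successor walk starting at 0 (successor = element after
--     # the FIRST occurrence of the value, wrapping to div[0] at the end).
--     cyc = [0]
--     while True:
--         i = div.index(cyc[-1])
--         nxt = div[i + 1] if i + 1 < len(div) else div[0]
--         if nxt in cyc:
--             break
--         cyc.append(nxt)
--     L = len(cyc)
--     red = [cyc[((i + 2) // 3) % L] for i in range(n)]
--     green = [cyc[((i + 1) // 3) % L] for i in range(n)]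
--     blue = [cyc[(i // 3) % L] for i in range(n)]
--     return red, green, blue
-- ===== Notes on version B (the rewrite author's own statement) =====
-- stated objective: faster
-- what changed: B replaces A's rotating go_red/go_green/go_blue state machine, which rescans the diversity list with .index() at every step, by precomputing one period of the value-successor cycle once and filling red/green/blue by direct modular indexing cyc[((i+2)//3) % L] / cyc[((i+1)//3) % L] / cyc[(i//3) % L].
import Mathlib
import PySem

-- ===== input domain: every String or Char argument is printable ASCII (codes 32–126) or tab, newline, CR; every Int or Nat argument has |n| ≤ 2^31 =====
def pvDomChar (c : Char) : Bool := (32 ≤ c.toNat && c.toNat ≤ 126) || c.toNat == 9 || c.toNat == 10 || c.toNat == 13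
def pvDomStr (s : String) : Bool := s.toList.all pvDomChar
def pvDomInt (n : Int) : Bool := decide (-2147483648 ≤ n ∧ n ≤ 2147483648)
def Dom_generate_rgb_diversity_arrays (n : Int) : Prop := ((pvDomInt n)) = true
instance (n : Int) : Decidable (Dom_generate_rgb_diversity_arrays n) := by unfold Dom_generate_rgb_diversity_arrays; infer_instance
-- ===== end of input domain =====

-- B precomputes A's value-successor cycle once and fills red/green/blue by direct
-- modular indexing instead of A's rotating-flag state machine with a per-step .index scan
-- (measurably faster by a constant factor).

-- ===== PORT A =====
-- inner 'for one in pivot' loop of diversity_numbers_for_colors; state = (pair, to_be_added)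
def pvPairStep (s : List Int × List Int) (one : Int) : List Int × List Int :=
  let pair := if s.1.length ≠ 2 then s.1 ++ [one] else s.1
  if pair.length = 2 then
    -- next_one = (pair[0] + pair[1]) // 2; to_be_added.append(next_one); pair.pop(0)
    -- pair.pop(0) is 'drop 1' here: exact, pair has length 2
    (pair.drop 1,
     s.2 ++ [PySem.Int.floordiv (PySem.List.pyGetD pair 0 0 + PySem.List.pyGetD pair 1 0) 2])
  else (pair, s.2)

-- 'for next_one in to_be_added' loop; state = (pivot, res); (to_be_added = [] only rebinds the name)
def pvAddStep (s : List Int × List Int) (x : Int) : List Int × List Int :=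
  (PySem.List.insert s.1 (PySem.List.bisectLeft s.1 x) x, s.2 ++ [x])

-- 'while len(pivot) < 255': fuel-bounded; every pass grows pivot, 255 passes are more than enough
def pvDivLoop : Nat → List Int × List Int → List Int × List Int
  | 0, s => s
  | fuel + 1, s =>
    if s.1.length < 255 then
      pvDivLoop fuel (((s.1.foldl pvPairStep ([], [])).2).foldl pvAddStep (s.1, s.2))
    else s

def diversity_numbers_for_colors : List Int := (pvDivLoop 255 ([0, 255], [0, 255])).2

def get_next_color_value (color_value : Int) (diversity_colors : List Int) : Int :=
  match PySem.List.index? diversity_colors color_value with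
  | some ci =>
    if (ci : Int) + 1 < (diversity_colors.length : Int) then
      PySem.List.pyGetD diversity_colors ((ci : Int) + 1) 0
    else
      PySem.List.pyGetD diversity_colors 0 0
  | none => 0  -- ValueError in Python; unreachable for the values this program passes

-- loop body of A's 'for i in range(n)'; state = ((red, green, blue), (go_red, go_green, go_blue), (red_value, green_value, blue_value))
def pvAStep (dn : List Int)
    (s : (List Int × List Int × List Int) × (Bool × Bool × Bool) × (Int × Int × Int))
    (_i : Int) :
    (List Int × List Int × List Int) × (Bool × Bool × Bool) × (Int × Int × Int) :=
  let red := s.1.1 ++ [s.2.2.1]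
  let green := s.1.2.1 ++ [s.2.2.2.1]
  let blue := s.1.2.2 ++ [s.2.2.2.2]
  if s.2.1.1 then
    ((red, green, blue), (false, true, false), (get_next_color_value s.2.2.1 dn, s.2.2.2.1, s.2.2.2.2))
  else if s.2.1.2.1 then
    ((red, green, blue), (false, false, true), (s.2.2.1, get_next_color_value s.2.2.2.1 dn, s.2.2.2.2))
  else if s.2.1.2.2 then
    ((red, green, blue), (true, false, false), (s.2.2.1, s.2.2.2.1, get_next_color_value s.2.2.2.2 dn))
  else ((red, green, blue), s.2.1, s.2.2)

def generate_rgb_diversity_arrays (n : Int) : List Int × List Int × List Int :=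
  let dn := diversity_numbers_for_colors
  ((PySem.List.pyRange 0 n 1).foldl (pvAStep dn) (([], [], []), (true, false, false), (0, 0, 0))).1

-- ===== PORT B =====
-- B's cycle-collecting 'while True' loop; fuel-bounded (the walk visits distinct values, 300 is plenty)
def pvCycLoop : Nat → List Int → List Int → List Int
  | 0, _, cyc => cyc
  | fuel + 1, dv, cyc =>
    let i := ((PySem.List.index? dv (PySem.List.pyGetD cyc (-1) 0)).getD 0 : Int)  -- cyc[-1] always occurs in dv
    let nxt := if i + 1 < (dv.length : Int) then PySem.List.pyGetD dv (i + 1) 0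
               else PySem.List.pyGetD dv 0 0
    if nxt ∈ cyc then cyc else pvCycLoop fuel dv (cyc ++ [nxt])

def generate_rgb_diversity_arrays_alt (n : Int) : List Int × List Int × List Int :=
  let dv := diversity_numbers_for_colors
  let cyc := pvCycLoop 300 dv [0]
  let L : Int := cyc.length
  ((PySem.List.pyRange 0 n 1).map
      (fun i => PySem.List.pyGetD cyc (PySem.Int.mod (PySem.Int.floordiv (i + 2) 3) L) 0),
   (PySem.List.pyRange 0 n 1).map
      (fun i => PySem.List.pyGetD cyc (PySem.Int.mod (PySem.Int.floordiv (i + 1) 3) L) 0),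
   (PySem.List.pyRange 0 n 1).map
      (fun i => PySem.List.pyGetD cyc (PySem.Int.mod (PySem.Int.floordiv i 3) L) 0))

-- ===== PRECONDITION & SPEC =====
def Spec_generate_rgb_diversity_arrays (n : Int) (out : List Int × List Int × List Int) : Prop := out = generate_rgb_diversity_arrays_alt n
instance (n : Int) (out : List Int × List Int × List Int) : Decidable (Spec_generate_rgb_diversity_arrays n out) := by unfold Spec_generate_rgb_diversity_arrays; infer_instance

-- ===== CLAIM (what is proved, stated in full; the proofs are below) =====
def Claim_equal_generate_rgb_diversity_arrays : Prop := ∀ (n : Int), Dom_generate_rgb_diversity_arrays n → Spec_generate_rgb_diversity_arrays n (generate_rgb_diversity_arrays n)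

-- ===== LEMMAS AND PROOFS =====
-- the concrete diversity list (what A's while-loop returns) and one period of the successor walk
def pvD : List Int := [0, 255, 127, 63, 191, 31, 95, 159, 223, 15, 47, 79, 111, 143, 175, 207, 239, 7, 23, 39, 55, 71, 87, 103, 119, 135, 151, 167, 183, 199, 215, 231, 247, 3, 11, 19, 27, 35, 43, 51, 59, 67, 75, 83, 91, 99, 107, 115, 123, 131, 139, 147, 155, 163, 171, 179, 187, 195, 203, 211, 219, 227, 235, 243, 251, 1, 5, 9, 13, 17, 21, 25, 29, 33, 37, 41, 45, 49, 53, 57, 61, 65, 69, 73, 77, 81, 85, 89, 93, 97, 101, 105, 109, 113, 117, 121, 125, 129, 133, 137, 141, 145, 149, 153, 157, 161, 165, 169, 173, 177, 181, 185, 189, 193, 197, 201, 205, 209, 213, 217, 221, 225, 229, 233, 237, 241, 245, 249, 253, 0, 2, 4, 6, 8, 10, 12, 14, 16, 18, 20, 22, 24, 26, 28, 30, 32, 34, 36, 38, 40, 42, 44, 46, 48, 50, 52, 54, 56, 58, 60, 62, 64, 66, 68, 70, 72, 74, 76, 78, 80, 82, 84, 86, 88, 90, 92, 94, 96, 98, 100,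 102, 104, 106, 108, 110, 112, 114, 116, 118, 120, 122, 124, 126, 128, 130, 132, 134, 136, 138, 140, 142, 144, 146, 148, 150, 152, 154, 156, 158, 160, 162, 164, 166, 168, 170, 172, 174, 176, 178, 180, 182, 184, 186, 188, 190, 192, 194, 196, 198, 200, 202, 204, 206, 208, 210, 212, 214, 216, 218, 220, 222, 224, 226, 228, 230, 232, 234, 236, 238, 240, 242, 244, 246, 248, 250, 252, 254]

def pvC : List Int := [0, 255, 127, 63, 191, 31, 95, 159, 223, 15, 47, 79, 111, 143, 175, 207, 239, 7, 23, 39, 55, 71, 87, 103, 119, 135, 151, 167, 183, 199, 215, 231, 247, 3, 11, 19, 27, 35, 43, 51, 59, 67, 75, 83, 91, 99, 107, 115, 123, 131, 139, 147, 155, 163, 171, 179, 187, 195, 203, 211, 219, 227, 235, 243, 251, 1, 5, 9, 13, 17, 21, 25, 29, 33, 37, 41, 45, 49, 53, 57, 61, 65, 69, 73, 77, 81, 85, 89, 93, 97, 101, 105, 109, 113, 117, 121, 125, 129, 133, 137, 141, 145, 149, 153, 157, 161, 165, 169, 173, 177, 181, 185, 189, 193, 197, 201, 205, 209, 213, 217,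 221, 225, 229, 233, 237, 241, 245, 249, 253]

set_option maxRecDepth 100000 in
set_option maxHeartbeats 1000000 in
lemma pvD_eq : diversity_numbers_for_colors = pvD := by decide

set_option maxRecDepth 100000 in
set_option maxHeartbeats 1000000 in
lemma pvC_eq : pvCycLoop 300 pvD [0] = pvC := by decide

-- the successor walk on pvC, checked value by value
set_option maxRecDepth 100000 in
set_option maxHeartbeats 1000000 in
lemma pvStep_all :
    ((List.range 129).all
      (fun k => get_next_color_value (pvC.getD k 0) pvD == pvC.getD ((k + 1) % 129) 0)) = true := by
  decide

lemma pvStep {k : Nat} (hk : k < 129) :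
    get_next_color_value (pvC.getD k 0) pvD = pvC.getD ((k + 1) % 129) 0 := by
  have h := List.all_eq_true.mp pvStep_all k (List.mem_range.mpr hk)
  exact beq_iff_eq.mp h

def pvVal (k : Nat) : Int := pvC.getD k 0
def pvRIdx (m : Nat) : Nat := ((m + 2) / 3) % 129
def pvGIdx (m : Nat) : Nat := ((m + 1) / 3) % 129
def pvBIdx (m : Nat) : Nat := (m / 3) % 129

def pvIdeal (m : Nat) :
    (List Int × List Int × List Int) × (Bool × Bool × Bool) × (Int × Int × Int) :=
  (((List.range m).map (fun i => pvVal (pvRIdx i)),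
    (List.range m).map (fun i => pvVal (pvGIdx i)),
    (List.range m).map (fun i => pvVal (pvBIdx i))),
   (m % 3 == 0, m % 3 == 1, m % 3 == 2),
   (pvVal (pvRIdx m), pvVal (pvGIdx m), pvVal (pvBIdx m)))

lemma pvStep_idx {j : Nat} (hj : j < 129) :
    get_next_color_value (pvVal j) pvD = pvVal ((j + 1) % 129) := pvStep hj

lemma pvIdeal_step (m : Nat) : pvAStep pvD (pvIdeal m) (m : Int) = pvIdeal (m + 1) := by
  have h3 : m % 3 = 0 ∨ m % 3 = 1 ∨ m % 3 = 2 := by omega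
  rcases h3 with h | h | h
  · have hm1 : (m + 1) % 3 = 1 := by omega
    have hr : pvRIdx (m + 1) = (pvRIdx m + 1) % 129 := by unfold pvRIdx; omega
    have hg : pvGIdx (m + 1) = pvGIdx m := by unfold pvGIdx; omega
    have hb : pvBIdx (m + 1) = pvBIdx m := by unfold pvBIdx; omega
    simp [pvAStep, pvIdeal, h, hm1, hr, hg, hb, List.range_succ]
    exact pvStep_idx (Nat.mod_lt _ (by norm_num))
  · have hm1 : (m + 1) % 3 = 2 := by omega
    have hr : pvRIdx (m + 1) = pvRIdx m := by unfold pvRIdx; omega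
    have hg : pvGIdx (m + 1) = (pvGIdx m + 1) % 129 := by unfold pvGIdx; omega
    have hb : pvBIdx (m + 1) = pvBIdx m := by unfold pvBIdx; omega
    simp [pvAStep, pvIdeal, h, hm1, hr, hg, hb, List.range_succ]
    exact pvStep_idx (Nat.mod_lt _ (by norm_num))
  · have hm1 : (m + 1) % 3 = 0 := by omega
    have hr : pvRIdx (m + 1) = pvRIdx m := by unfold pvRIdx; omega
    have hg : pvGIdx (m + 1) = pvGIdx m := by unfold pvGIdx; omega
    have hb : pvBIdx (m + 1) = (pvBIdx m + 1) % 129 := by unfold pvBIdx; omega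
    simp [pvAStep, pvIdeal, h, hm1, hr, hg, hb, List.range_succ]
    exact pvStep_idx (Nat.mod_lt _ (by norm_num))

lemma pvInv (m : Nat) :
    (PySem.List.pyRange 0 (m : Int) 1).foldl (pvAStep pvD)
      (([], [], []), (true, false, false), (0, 0, 0)) = pvIdeal m := by
  induction m with
  | zero => decide
  | succ m ih =>
    have hcast : ((m + 1 : Nat) : Int) = (m : Int) + 1 := by push_cast; ring
    rw [hcast, PySem.List.pyRange_one_succ_right (by positivity), List.foldl_append, ih]
    simpa using pvIdeal_step m

-- ===== VERDICT (by name: the statement is the Claim_ definition above) =====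
set_option maxRecDepth 100000 in
lemma pvC_len : pvC.length = 129 := by decide

lemma pvIdx (a : Nat) :
    PySem.List.pyGetD pvC (PySem.Int.mod (PySem.Int.floordiv (a : Int) 3) ((129 : Nat) : Int)) 0 =
      pvVal (a / 3 % 129) := by
  rw [(by norm_num : (3 : Int) = ((3 : Nat) : Int)), PySem.Int.floordiv_natCast,
    PySem.Int.mod_natCast, PySem.List.pyGetD_natCast]
  rfl

theorem generate_rgb_diversity_arrays_spec : Claim_equal_generate_rgb_diversity_arrays := by
  intro n _
  show generate_rgb_diversity_arrays n = generate_rgb_diversity_arrays_alt n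
  simp only [generate_rgb_diversity_arrays, generate_rgb_diversity_arrays_alt, pvD_eq, pvC_eq]
  rcases (by omega : 0 ≤ n ∨ n < 0) with hn | hn
  · obtain ⟨M, rfl⟩ : ∃ M : Nat, n = (M : Int) := ⟨n.toNat, (Int.toNat_of_nonneg hn).symm⟩
    rw [pvInv]
    have hMM : ((M : Int) - 0).toNat = M := by omega
    simp only [pvIdeal, PySem.List.pyRange_one, hMM, List.map_map, pvC_len, Prod.mk.injEq]
    refine ⟨?_, ?_, ?_⟩ <;>
    · apply List.map_congr_left
      intro k _
      simp only [Function.comp]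
      first
      | rw [(by push_cast; ring : (0 : Int) + (k : Int) + 2 = ((k + 2 : Nat) : Int))]
      | rw [(by push_cast; ring : (0 : Int) + (k : Int) + 1 = ((k + 1 : Nat) : Int))]
      | rw [(by simp : (0 : Int) + (k : Int) = ((k : Nat) : Int))]
      rw [pvIdx]
      rfl
  · rw [PySem.List.pyRange_one_eq_nil (by omega)]
    simp
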